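-- pv_equiv track=rewrite | github.com/tranquilo-01/Algorithms-and-Data-Structures-AGH-Course | ASD_przed_1_kolosem/2020/2020_3.py | every_sum
-- ===== SOURCE A (Python) =====
-- def quick_sort(tab, l, r):
--     if l < r:
--         pivot = partition(tab, l, r)
--         quick_sort(tab, l, pivot - 1)
--         quick_sort(tab, pivot + 1, r)
--
-- def partition(tab, l, r):
--     i = l - 1
--     for j in range(l, r):
--         if tab[j] < tab[r]:
--             i += 1
--             tab[i], tab[j] = tab[j], tab[i]
--
--     i += 1
--     tab[i], tab[r] = tab[r], tab[i]
--     return i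
--
-- def every_sum(tab):
--     tlen = len(tab)
--     quick_sort(tab, 0, tlen - 1)
--     for ind in range(tlen):
--         l = 0
--         r = tlen - 1
--         suma = tab[ind]
--         while l < r:
--             if l == ind or r == ind:
--                 if l == ind:
--                     l += 1
--                 if r == ind:
--                     r -= 1
--             elif tab[l] + tab[r] < suma:
--                 l += 1
--             elif tab[l] + tab[r] > suma:
--                 r -= 1
--             else:
--                 break
--         else:
--             return False
--     return True
-- ===== SOURCE B (Python) =====
-- def every_sum(tab):
--     # built-in in-place sort (same mutation side effect as A's quicksort), then for each
--     # index a one-pass 2-SUM check with a set of values seen at the other indices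
--     tab.sort()
--     n = len(tab)
--     for ind in range(n):
--         suma = tab[ind]
--         seen = set()
--         found = False
--         for j in range(n):
--             if j == ind:
--                 continue
--             if suma - tab[j] in seen:
--                 found = True
--                 break
--             seen.add(tab[j])
--         if not found:
--             return False
--     return True
-- ===== Notes on version B (the rewrite author's own statement) =====
-- stated objective: idiomatic
-- what changed: A's hand-written in-place quicksort and per-index two-pointer sweep over the sorted array are replaced by Python's built-in list.sort() and, for each index, the standard one-pass 2-SUM check with a set of values seen at the other indices.
import Mathlib
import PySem

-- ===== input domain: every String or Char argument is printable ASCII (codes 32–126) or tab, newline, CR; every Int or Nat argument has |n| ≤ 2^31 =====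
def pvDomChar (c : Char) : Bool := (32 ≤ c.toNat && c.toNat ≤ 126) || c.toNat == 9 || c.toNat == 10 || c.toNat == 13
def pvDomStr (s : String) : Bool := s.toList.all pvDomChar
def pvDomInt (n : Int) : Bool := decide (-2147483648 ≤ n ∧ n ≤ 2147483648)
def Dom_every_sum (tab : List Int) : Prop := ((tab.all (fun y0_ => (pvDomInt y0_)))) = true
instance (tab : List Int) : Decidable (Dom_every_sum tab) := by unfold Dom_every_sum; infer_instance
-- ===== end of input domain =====

-- B replaces A's hand-written quicksort + per-index two-pointer walk by the built-in sort and,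
-- per index, the standard one-pass seen-set 2-SUM check (idiomatic, same cost). Both A and B sort
-- the argument list in place in Python; the equivalence proved here is about the RETURN value only.

-- ===== PORT A =====
-- every list access in A is at an in-range non-negative index (established in the proofs below),
-- so the defaulted getter pyGetD/pySetD is exact there
def pvGet (xs : List Int) (i : Int) : Int := PySem.List.pyGetD xs i 0

-- tab[i], tab[j] = tab[j], tab[i]  (both right-hand sides read the original list)
def pvSwap (xs : List Int) (i j : Int) : List Int :=
  PySem.List.pySetD (PySem.List.pySetD xs i (pvGet xs j)) j (pvGet xs i)

def partitionP (tab : List Int) (l r : Int) : List Int × Int :=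
  let s := (PySem.List.pyRange l r 1).foldl
    (fun (s : List Int × Int) j =>
      if pvGet s.1 j < pvGet s.1 r then (pvSwap s.1 (s.2 + 1) j, s.2 + 1) else s)
    (tab, l - 1)
  let i := s.2 + 1
  (pvSwap s.1 i r, i)

-- fuel makes the recursion structural; fuel tab.length + 1 is enough (each level's interval
-- r - l strictly shrinks), which quickSort_eq_sorted below proves
def quickSortP : Nat → List Int → Int → Int → List Int
  | 0, tab, _, _ => tab
  | fuel + 1, tab, l, r =>
    if l < r then
      let p := partitionP tab l r
      quickSortP fuel (quickSortP fuel p.1 l (p.2 - 1)) (p.2 + 1) r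
    else tab

-- the inner 'while l < r' loop; returns true on break (pair found), false on normal exit
def twoPtr (s : List Int) (ind suma l r : Int) : Bool :=
  if l < r then
    if l = ind ∨ r = ind then
      twoPtr s ind suma (if l = ind then l + 1 else l) (if r = ind then r - 1 else r)
    else if pvGet s l + pvGet s r < suma then twoPtr s ind suma (l + 1) r
    else if pvGet s l + pvGet s r > suma then twoPtr s ind suma l (r - 1)
    else true
  else false
termination_by (r - l).toNat
decreasing_by all_goals first | (split_ifs <;> omega) | omega

def every_sum (tab : List Int) : Bool :=
  let tlen : Int := tab.length
  let stab := quickSortP (tab.length + 1) tab 0 (tlen - 1)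
  -- 'for ind in range(tlen): … else: return False' / final 'return True'
  (PySem.List.pyRange 0 tlen 1).all fun ind => twoPtr stab ind (pvGet stab ind) 0 (tlen - 1)

-- ===== PORT B =====
-- the inner 'for j in range(n)' loop with its break: continue past ind, succeed when
-- suma - tab[j] was already seen, else add tab[j] to the seen-set
def pvScan (s : List Int) (suma ind : Int) (js : List Int) (seen : PySem.Set Int) : Bool :=
  match js with
  | [] => false
  | j :: rest =>
    if j = ind then pvScan s suma ind rest seen
    else if PySem.Set.contains seen (suma - PySem.List.pyGetD s j 0) then true
    else pvScan s suma ind rest (PySem.Set.add seen (PySem.List.pyGetD s j 0))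

def every_sum_alt (tab : List Int) : Bool :=
  let s := PySem.List.sorted tab (fun x => x) false   -- tab.sort()
  let n : Int := s.length
  -- 'if not found: return False' at the end of the outer for, 'return True' after it
  (PySem.List.pyRange 0 n 1).all fun ind =>
    pvScan s (PySem.List.pyGetD s ind 0) ind (PySem.List.pyRange 0 n 1) PySem.Set.empty

-- ===== PRECONDITION & SPEC =====
def Spec_every_sum (tab : List Int) (out : Bool) : Prop := out = every_sum_alt tab
instance (tab : List Int) (out : Bool) : Decidable (Spec_every_sum tab out) := by unfold Spec_every_sum; infer_instance

-- ===== CLAIM (what is proved, stated in full; the proofs are below) =====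
def Claim_equal_every_sum : Prop := ∀ (tab : List Int), Dom_every_sum tab → Spec_every_sum tab (every_sum tab)

-- ===== LEMMAS AND PROOFS =====

theorem pvGet_eq_getElem {xs : List Int} {i : Int} (h0 : 0 ≤ i) (h : i < (xs.length : Int)) :
    pvGet xs i = xs[i.toNat]'(by omega) := PySem.List.pyGetD_eq_getElem xs 0 h0 h

theorem length_pvSwap (xs : List Int) (a b : Int) : (pvSwap xs a b).length = xs.length := by
  simp [pvSwap, PySem.List.length_pySetD]

theorem pvSwap_eq (xs : List Int) (a b : Int) (ha : 0 ≤ a) (hb : 0 ≤ b) :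
    pvSwap xs a b = (xs.set a.toNat (pvGet xs b)).set b.toNat (pvGet xs a) := by
  rw [pvSwap, PySem.List.pySetD_of_nonneg _ _ ha, PySem.List.pySetD_of_nonneg _ _ hb]

theorem pvGet_pvSwap (xs : List Int) (a b k : Int)
    (ha : 0 ≤ a) (ha' : a < (xs.length : Int)) (hb : 0 ≤ b) (hb' : b < (xs.length : Int))
    (hk : 0 ≤ k) (hk' : k < (xs.length : Int)) :
    pvGet (pvSwap xs a b) k =
      if k = b then pvGet xs a else if k = a then pvGet xs b else pvGet xs k := by
  rw [pvSwap_eq xs a b ha hb]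
  rw [pvGet_eq_getElem hk (by simpa using hk')]
  rw [List.getElem_set, List.getElem_set]
  rw [pvGet_eq_getElem ha ha', pvGet_eq_getElem hb hb', pvGet_eq_getElem hk hk']
  have e1 : (b.toNat = k.toNat) ↔ k = b := by omega
  have e2 : (a.toNat = k.toNat) ↔ k = a := by omega
  split_ifs with h1 h2 h3 h4 h5 <;> simp_all

theorem pvSwap_perm (xs : List Int) (a b : Int)
    (ha : 0 ≤ a) (ha' : a < (xs.length : Int)) (hb : 0 ≤ b) (hb' : b < (xs.length : Int)) :
    (pvSwap xs a b).Perm xs := by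
  rw [pvSwap_eq xs a b ha hb,
    pvGet_eq_getElem ha ha', pvGet_eq_getElem hb hb']
  exact List.set_set_perm (by omega) (by omega)

theorem pvMono {xs : List Int} (hs : xs.Pairwise (· ≤ ·)) {a b : Int}
    (h0 : 0 ≤ a) (hab : a ≤ b) (hb : b < (xs.length : Int)) : pvGet xs a ≤ pvGet xs b := by
  rw [pvGet_eq_getElem h0 (by omega), pvGet_eq_getElem (by omega) hb]
  rcases eq_or_lt_of_le hab with rfl | hlt
  · exact le_refl _
  · exact List.pairwise_iff_getElem.1 hs a.toNat b.toNat (by omega) (by omega) (by omega)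

theorem all_pyRange (a b : Int) (f : Int → Bool) :
    ((PySem.List.pyRange a b 1).all f = true) ↔ ∀ i, a ≤ i → i < b → f i = true := by
  simp [List.all_eq_true, PySem.List.mem_pyRange_one]

-- the segment tab[l..r] (inclusive), as a list
def pvSeg (xs : List Int) (l r : Int) : List Int := (xs.drop l.toNat).take (r + 1 - l).toNat
theorem mem_pvSeg_iff {xs : List Int} {l r : Int} (h0 : 0 ≤ l) (hr : r < (xs.length : Int)) {x : Int} :
    x ∈ pvSeg xs l r ↔ ∃ k, l ≤ k ∧ k ≤ r ∧ x = pvGet xs k := by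
  simp only [pvSeg, List.mem_iff_getElem, List.getElem_take, List.getElem_drop,
    List.length_take, List.length_drop]
  constructor
  · rintro ⟨m, hm, rfl⟩
    refine ⟨l + m, by omega, by omega, ?_⟩
    rw [pvGet_eq_getElem (by omega) (by omega)]
    congr 1; omega
  · rintro ⟨k, hk1, hk2, rfl⟩
    refine ⟨(k - l).toNat, by omega, ?_⟩
    rw [pvGet_eq_getElem (by omega) (by omega)]
    congr 1; omega

theorem pvSeg_perm_of {xs ys : List Int} {l r : Int}
    (hlen : xs.length = ys.length) (hperm : xs.Perm ys) (h0 : 0 ≤ l) (hr : r < (xs.length : Int))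
    (houts : ∀ k : Int, 0 ≤ k → k < (xs.length : Int) → (k < l ∨ r < k) → pvGet xs k = pvGet ys k) :
    (pvSeg xs l r).Perm (pvSeg ys l r) := by
  have hpre : xs.take l.toNat = ys.take l.toNat := by
    apply List.ext_getElem (by simp [hlen])
    intro m hm1 hm2
    simp only [List.getElem_take]
    have := houts m (by omega) (by simp at hm1; omega) (by simp at hm1; omega)
    rw [pvGet_eq_getElem (by omega) (by simp at hm1 ⊢; omega),
        pvGet_eq_getElem (by omega) (by simp at hm1 hlen ⊢; omega)] at this
    simpa using this
  have hsuf : (xs.drop l.toNat).drop (r + 1 - l).toNat = (ys.drop l.toNat).drop (r + 1 - l).toNat := by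
    rw [List.drop_drop, List.drop_drop]
    apply List.ext_getElem (by simp [hlen])
    intro m hm1 hm2
    simp only [List.getElem_drop]
    have hmlt : ((r + 1 - l).toNat + l.toNat + m : Int) < (xs.length : Int) := by
      simp at hm1; omega
    have := houts ((r + 1 - l).toNat + l.toNat + m) (by omega) hmlt (by omega)
    rw [pvGet_eq_getElem (by omega) hmlt,
        pvGet_eq_getElem (by omega) (by omega)] at this
    convert this using 2 <;> omega
  have hx : xs = xs.take l.toNat ++ (pvSeg xs l r ++ (xs.drop l.toNat).drop (r + 1 - l).toNat) := by
    rw [pvSeg, List.take_append_drop, List.take_append_drop]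
  have hy : ys = ys.take l.toNat ++ (pvSeg ys l r ++ (ys.drop l.toNat).drop (r + 1 - l).toNat) := by
    rw [pvSeg, List.take_append_drop, List.take_append_drop]
  rw [hx, hy, hpre, ← hsuf] at hperm
  rw [List.perm_append_left_iff] at hperm
  rw [List.perm_append_right_iff] at hperm
  exact hperm

theorem pfold (tab : List Int) (l r : Int) (h0 : 0 ≤ l) (hr : r < (tab.length : Int))
    (n : Nat) :
    ∀ (j : Int) (cur : List Int) (i : Int), (r - j).toNat = n →
    l ≤ j → j ≤ r → cur.length = tab.length → l - 1 ≤ i → i < j → cur.Perm tab →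
    (∀ k : Int, 0 ≤ k → k < (tab.length : Int) → (k < l ∨ j ≤ k) → pvGet cur k = pvGet tab k) →
    (∀ k : Int, l ≤ k → k ≤ i → pvGet cur k < pvGet tab r) →
    (∀ k : Int, i < k → k < j → pvGet tab r ≤ pvGet cur k) →
    ((((PySem.List.pyRange j r 1).foldl
      (fun (s : List Int × Int) j =>
        if pvGet s.1 j < pvGet s.1 r then (pvSwap s.1 (s.2 + 1) j, s.2 + 1) else s)
      (cur, i)).1.length = tab.length) ∧
     (l - 1 ≤ ((PySem.List.pyRange j r 1).foldl
      (fun (s : List Int × Int) j =>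
        if pvGet s.1 j < pvGet s.1 r then (pvSwap s.1 (s.2 + 1) j, s.2 + 1) else s)
      (cur, i)).2 ∧ ((PySem.List.pyRange j r 1).foldl
      (fun (s : List Int × Int) j =>
        if pvGet s.1 j < pvGet s.1 r then (pvSwap s.1 (s.2 + 1) j, s.2 + 1) else s)
      (cur, i)).2 < r) ∧
     (((PySem.List.pyRange j r 1).foldl
      (fun (s : List Int × Int) j =>
        if pvGet s.1 j < pvGet s.1 r then (pvSwap s.1 (s.2 + 1) j, s.2 + 1) else s)
      (cur, i)).1.Perm tab) ∧
     (∀ k : Int, 0 ≤ k → k < (tab.length : Int) → (k < l ∨ r ≤ k) →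
        pvGet ((PySem.List.pyRange j r 1).foldl
      (fun (s : List Int × Int) j =>
        if pvGet s.1 j < pvGet s.1 r then (pvSwap s.1 (s.2 + 1) j, s.2 + 1) else s)
      (cur, i)).1 k = pvGet tab k) ∧
     (∀ k : Int, l ≤ k → k ≤ ((PySem.List.pyRange j r 1).foldl
      (fun (s : List Int × Int) j =>
        if pvGet s.1 j < pvGet s.1 r then (pvSwap s.1 (s.2 + 1) j, s.2 + 1) else s)
      (cur, i)).2 → pvGet ((PySem.List.pyRange j r 1).foldl
      (fun (s : List Int × Int) j =>
        if pvGet s.1 j < pvGet s.1 r then (pvSwap s.1 (s.2 + 1) j, s.2 + 1) else s)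
      (cur, i)).1 k < pvGet tab r) ∧
     (∀ k : Int, ((PySem.List.pyRange j r 1).foldl
      (fun (s : List Int × Int) j =>
        if pvGet s.1 j < pvGet s.1 r then (pvSwap s.1 (s.2 + 1) j, s.2 + 1) else s)
      (cur, i)).2 < k → k < r → pvGet tab r ≤ pvGet ((PySem.List.pyRange j r 1).foldl
      (fun (s : List Int × Int) j =>
        if pvGet s.1 j < pvGet s.1 r then (pvSwap s.1 (s.2 + 1) j, s.2 + 1) else s)
      (cur, i)).1 k)) := by
  induction n with
  | zero =>
    intro j cur i hn hlj hjr hclen hli hij hperm houts hlow hhigh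
    have hjr' : j = r := by omega
    subst hjr'
    rw [PySem.List.pyRange_one_eq_nil (by omega)]
    simp only [List.foldl_nil]
    exact ⟨hclen, ⟨by omega, by omega⟩, hperm,
      fun k hk1 hk2 hk3 => houts k hk1 hk2 (by omega), hlow, hhigh⟩
  | succ n ih =>
    intro j cur i hn hlj hjr hclen hli hij hperm houts hlow hhigh
    have hjr' : j < r := by omega
    rw [PySem.List.pyRange_one_cons hjr']
    simp only [List.foldl_cons]
    have hcr : pvGet cur r = pvGet tab r := houts r (by omega) hr (by omega)
    by_cases hc : pvGet cur j < pvGet cur r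
    · rw [if_pos hc]
      -- swap branch
      have hb1 : (0:Int) ≤ i + 1 := by omega
      have hb2 : i + 1 < (cur.length : Int) := by rw [hclen]; omega
      have hb3 : (0:Int) ≤ j := by omega
      have hb4 : j < (cur.length : Int) := by rw [hclen]; omega
      have hget : ∀ k : Int, 0 ≤ k → k < (tab.length : Int) →
          pvGet (pvSwap cur (i + 1) j) k =
            if k = j then pvGet cur (i + 1) else if k = i + 1 then pvGet cur j else pvGet cur k := by
        intro k hk1 hk2
        exact pvGet_pvSwap cur (i+1) j k hb1 hb2 hb3 hb4 hk1 (by rw [hclen]; exact hk2)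
      apply ih (j + 1) (pvSwap cur (i + 1) j) (i + 1) (by omega) (by omega) (by omega)
        (by rw [length_pvSwap]; exact hclen) (by omega) (by omega)
        ((pvSwap_perm cur (i+1) j hb1 hb2 hb3 hb4).trans hperm)
      · -- outs
        intro k hk1 hk2 hk3
        rw [hget k hk1 hk2, if_neg (by omega), if_neg (by omega)]
        exact houts k hk1 hk2 (by omega)
      · -- low
        intro k hk1 hk2
        rw [hget k (by omega) (by omega)]
        rw [hcr] at hc
        by_cases hkj : k = j
        · rw [if_pos hkj]
          have : i + 1 = j := by omega
          rw [this]; exact hc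
        · rw [if_neg hkj]
          by_cases hki : k = i + 1
          · rw [if_pos hki]; exact hc
          · rw [if_neg hki]; exact hlow k hk1 (by omega)
      · -- high
        intro k hk1 hk2
        rw [hget k (by omega) (by omega)]
        by_cases hkj : k = j
        · rw [if_pos hkj]
          exact hhigh (i + 1) (by omega) (by omega)
        · rw [if_neg hkj, if_neg (by omega)]
          exact hhigh k (by omega) (by omega)
    · rw [if_neg hc]
      apply ih (j + 1) cur i (by omega) (by omega) (by omega) hclen (by omega) (by omega) hperm
      · intro k hk1 hk2 hk3
        exact houts k hk1 hk2 (by omega)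
      · exact hlow
      · intro k hk1 hk2
        by_cases hkj : k = j
        · subst hkj
          rw [hcr] at hc; omega
        · exact hhigh k hk1 (by omega)

theorem partition_spec (tab : List Int) (l r : Int)
    (h0 : 0 ≤ l) (hlr : l < r) (hr : r < (tab.length : Int)) :
    (partitionP tab l r).1.length = tab.length ∧
    l ≤ (partitionP tab l r).2 ∧ (partitionP tab l r).2 ≤ r ∧
    (partitionP tab l r).1.Perm tab ∧
    (∀ k : Int, 0 ≤ k → k < (tab.length : Int) → (k < l ∨ r < k) →
      pvGet (partitionP tab l r).1 k = pvGet tab k) ∧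
    (∀ k : Int, l ≤ k → k < (partitionP tab l r).2 →
      pvGet (partitionP tab l r).1 k < pvGet (partitionP tab l r).1 (partitionP tab l r).2) ∧
    (∀ k : Int, (partitionP tab l r).2 < k → k ≤ r →
      pvGet (partitionP tab l r).1 (partitionP tab l r).2 ≤ pvGet (partitionP tab l r).1 k) := by
  have H := pfold tab l r h0 hr (r - l).toNat l tab (l - 1) rfl (le_refl l) (by omega) rfl
    (by omega) (by omega) (List.Perm.refl tab)
    (fun k _ _ _ => rfl) (fun k hk1 hk2 => by omega) (fun k hk1 hk2 => by omega)
  set s := (PySem.List.pyRange l r 1).foldl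
      (fun (s : List Int × Int) j =>
        if pvGet s.1 j < pvGet s.1 r then (pvSwap s.1 (s.2 + 1) j, s.2 + 1) else s)
      (tab, l - 1) with hs
  obtain ⟨hlen, ⟨hi1, hi2⟩, hperm, houts, hlow, hhigh⟩ := H
  have hPdef : partitionP tab l r = (pvSwap s.1 (s.2 + 1) r, s.2 + 1) := by
    rw [partitionP]
  rw [hPdef]
  have hb1 : (0:Int) ≤ s.2 + 1 := by omega
  have hb2 : s.2 + 1 < (s.1.length : Int) := by rw [hlen]; omega
  have hb3 : (0:Int) ≤ r := by omega
  have hb4 : r < (s.1.length : Int) := by rw [hlen]; exact hr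
  have hget : ∀ k : Int, 0 ≤ k → k < (tab.length : Int) →
      pvGet (pvSwap s.1 (s.2 + 1) r) k =
        if k = r then pvGet s.1 (s.2 + 1) else if k = s.2 + 1 then pvGet s.1 r else pvGet s.1 k := by
    intro k hk1 hk2
    exact pvGet_pvSwap s.1 (s.2+1) r k hb1 hb2 hb3 hb4 hk1 (by rw [hlen]; exact hk2)
  have hsr : pvGet s.1 r = pvGet tab r := houts r (by omega) hr (by omega)
  have hp : pvGet (pvSwap s.1 (s.2 + 1) r) (s.2 + 1) = pvGet tab r := by
    rw [hget (s.2 + 1) (by omega) (by omega)]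
    by_cases hpr : s.2 + 1 = r
    · rw [if_pos hpr, hpr, hsr]
    · rw [if_neg hpr, if_pos rfl, hsr]
  refine ⟨by rw [length_pvSwap]; exact hlen, by omega, by omega,
    (pvSwap_perm s.1 (s.2+1) r hb1 hb2 hb3 hb4).trans hperm, ?_, ?_, ?_⟩
  · intro k hk1 hk2 hk3
    rw [hget k hk1 hk2, if_neg (by omega), if_neg (by omega)]
    exact houts k hk1 hk2 (by omega)
  · intro k hk1 hk2
    simp only at hk2 ⊢
    rw [hp, hget k (by omega) (by omega), if_neg (by omega), if_neg (by omega)]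
    exact hlow k hk1 (by omega)
  · intro k hk1 hk2
    simp only at hk1 ⊢
    rw [hp, hget k (by omega) (by omega)]
    by_cases hkr : k = r
    · rw [if_pos hkr]
      by_cases hpr : s.2 + 1 < r
      · exact hhigh (s.2 + 1) (by omega) hpr
      · have : s.2 + 1 = r := by omega
        rw [this, hsr]
    · rw [if_neg hkr, if_neg (by omega)]
      exact hhigh k (by omega) (by omega)

theorem quickSort_spec (fuel : Nat) : ∀ (tab : List Int) (l r : Int),
    0 ≤ l → r < (tab.length : Int) → (r - l).toNat < fuel →
    (quickSortP fuel tab l r).length = tab.length ∧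
    (quickSortP fuel tab l r).Perm tab ∧
    (∀ k : Int, 0 ≤ k → k < (tab.length : Int) → (k < l ∨ r < k) →
      pvGet (quickSortP fuel tab l r) k = pvGet tab k) ∧
    (∀ k1 k2 : Int, l ≤ k1 → k1 ≤ k2 → k2 ≤ r →
      pvGet (quickSortP fuel tab l r) k1 ≤ pvGet (quickSortP fuel tab l r) k2) := by
  induction fuel with
  | zero => intro tab l r _ _ hf; omega
  | succ fuel ih =>
    intro tab l r h0 hr hf
    by_cases hlr : l < r
    · have hq : quickSortP (fuel + 1) tab l r =
        quickSortP fuel (quickSortP fuel (partitionP tab l r).1 l ((partitionP tab l r).2 - 1))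
          ((partitionP tab l r).2 + 1) r := by
        rw [quickSortP, if_pos hlr]
      obtain ⟨plen, hp1, hp2, pperm, pouts, plow, phigh⟩ := partition_spec tab l r h0 hlr hr
      set cur := (partitionP tab l r).1 with hcur
      set p := (partitionP tab l r).2 with hp
      obtain ⟨len1, perm1, outs1, sort1⟩ :=
        ih cur l (p - 1) h0 (by rw [plen]; omega) (by omega)
      set out1 := quickSortP fuel cur l (p - 1) with hout1
      obtain ⟨len2, perm2, outs2, sort2⟩ :=
        ih out1 (p + 1) r (by omega) (by rw [len1, plen]; exact hr) (by omega)
      set out2 := quickSortP fuel out1 (p + 1) r with hout2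
      rw [hq]
      have lenA : out1.length = tab.length := by rw [len1, plen]
      have lenB : out2.length = tab.length := by rw [len2, lenA]
      have outs1' : ∀ k : Int, 0 ≤ k → k < (tab.length : Int) → (k < l ∨ p - 1 < k) →
          pvGet out1 k = pvGet cur k := fun k a b c => outs1 k a (by rw [plen]; exact b) c
      have outs2' : ∀ k : Int, 0 ≤ k → k < (tab.length : Int) → (k < p + 1 ∨ r < k) →
          pvGet out2 k = pvGet out1 k := fun k a b c => outs2 k a (by rw [lenA]; exact b) c
      have vp2 : pvGet out2 p = pvGet cur p := by
        rw [outs2' p (by omega) (by rw [← plen]; omega) (by omega),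
            outs1' p (by omega) (by rw [← plen]; omega) (by omega)]
      have hLseg : (pvSeg out1 l (p - 1)).Perm (pvSeg cur l (p - 1)) :=
        pvSeg_perm_of (by rw [len1]) perm1 h0 (by rw [lenA, ← plen]; omega )
          (fun k a b c => outs1' k a (by rw [← lenA]; exact b) c)
      have hRseg : (pvSeg out2 (p + 1) r).Perm (pvSeg out1 (p + 1) r) :=
        pvSeg_perm_of (by rw [len2]) perm2 (by omega) (by rw [lenB]; exact hr)
          (fun k a b c => outs2' k a (by rw [← lenB]; exact b) c)
      have hLeft : ∀ k : Int, l ≤ k → k ≤ p - 1 → pvGet out2 k < pvGet cur p := by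
        intro k hk1 hk2
        rw [outs2' k (by omega) (by rw [← plen]; omega) (by omega)]
        have hmem : pvGet out1 k ∈ pvSeg out1 l (p - 1) :=
          (mem_pvSeg_iff h0 (by rw [lenA, ← plen]; omega)).2 ⟨k, hk1, hk2, rfl⟩
        have hmem2 := hLseg.mem_iff.1 hmem
        obtain ⟨k', hk'1, hk'2, heq⟩ := (mem_pvSeg_iff h0 (by rw [plen, ← plen]; omega)).1 hmem2
        rw [heq]
        exact plow k' hk'1 (by omega)
      have hRight : ∀ k : Int, p + 1 ≤ k → k ≤ r → pvGet cur p ≤ pvGet out2 k := by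
        intro k hk1 hk2
        have hmem : pvGet out2 k ∈ pvSeg out2 (p + 1) r :=
          (mem_pvSeg_iff (by omega) (by rw [lenB]; exact hr)).2 ⟨k, hk1, hk2, rfl⟩
        have hmem2 := hRseg.mem_iff.1 hmem
        obtain ⟨k', hk'1, hk'2, heq⟩ := (mem_pvSeg_iff (by omega) (by rw [lenA]; exact hr)).1 hmem2
        rw [heq, outs1' k' (by omega) (by omega) (by omega)]
        exact phigh k' (by omega) hk'2
      refine ⟨lenB, (perm2.trans perm1).trans pperm, ?_, ?_⟩
      · intro k hk1 hk2 hk3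
        rw [outs2' k hk1 hk2 (by omega), outs1' k hk1 hk2 (by omega)]
        exact pouts k hk1 hk2 hk3
      · intro k1 k2 hk1 hk12 hk2
        rcases lt_trichotomy k2 p with h2 | h2 | h2
        · -- both in left part
          rw [outs2' k1 (by omega) (by rw [← plen]; omega) (by omega),
              outs2' k2 (by omega) (by rw [← plen]; omega) (by omega)]
          exact sort1 k1 k2 hk1 hk12 (by omega)
        · subst h2
          rcases eq_or_lt_of_le hk12 with rfl | h1
          · exact le_refl _
          · rw [vp2]
            exact le_of_lt (hLeft k1 hk1 (by omega))
        · rcases lt_trichotomy k1 p with h1 | h1 | h1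
          · exact le_of_lt (lt_of_lt_of_le (hLeft k1 hk1 (by omega))
              (hRight k2 (by omega) hk2))
          · subst h1
            rw [vp2]
            exact hRight k2 (by omega) hk2
          · exact sort2 k1 k2 (by omega) hk12 hk2
    · have hq : quickSortP (fuel + 1) tab l r = tab := by rw [quickSortP, if_neg hlr]
      rw [hq]
      refine ⟨rfl, List.Perm.refl _, fun k _ _ _ => rfl, ?_⟩
      intro k1 k2 h1 h2 h3
      have : k1 = k2 := by omega
      subst this; exact le_refl _

theorem quickSort_eq_sorted (tab : List Int) :
    quickSortP (tab.length + 1) tab 0 ((tab.length : Int) - 1) =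
      PySem.List.sorted tab (fun x => x) false := by
  obtain ⟨hlen, hperm, -, hsort⟩ := quickSort_spec (tab.length + 1) tab 0 ((tab.length : Int) - 1)
    (by omega) (by omega) (by omega)
  set out := quickSortP (tab.length + 1) tab 0 ((tab.length : Int) - 1) with hout
  have hpw : out.Pairwise (· ≤ ·) := by
    rw [List.pairwise_iff_getElem]
    intro i j hi hj hij
    have := hsort i j (by omega) (by omega) (by omega)
    rw [pvGet_eq_getElem (by omega) (by omega), pvGet_eq_getElem (by omega) (by omega)] at this
    simpa using this
  exact (PySem.List.sorted_id_eq_of_perm_of_pairwise tab out hperm hpw).symm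

theorem twoPtr_iff (s : List Int) (ind suma : Int) (hs : s.Pairwise (· ≤ ·)) :
    ∀ l r : Int, 0 ≤ l → r < (s.length : Int) →
    (twoPtr s ind suma l r = true ↔
      ∃ i j : Int, l ≤ i ∧ i < j ∧ j ≤ r ∧ i ≠ ind ∧ j ≠ ind ∧ pvGet s i + pvGet s j = suma) := by
  intro l r
  induction l, r using twoPtr.induct s ind suma with
  | case1 l r hlr hor ih =>
    intro h0 hr
    rw [twoPtr, if_pos hlr, if_pos hor]
    by_cases hl : l = ind
    · have hrne : ¬ r = ind := by omega
      rw [if_pos hl, if_neg hrne]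
      rw [dif_pos hl, dif_neg hrne] at ih
      rw [ih (by omega) hr]
      constructor
      · rintro ⟨i, j, h1, h2, h3, h4, h5, h6⟩
        exact ⟨i, j, by omega, h2, h3, h4, h5, h6⟩
      · rintro ⟨i, j, h1, h2, h3, h4, h5, h6⟩
        refine ⟨i, j, by omega, h2, h3, h4, h5, h6⟩
    · have hrl : r = ind := by tauto
      rw [if_neg hl, if_pos hrl]
      rw [dif_neg hl, dif_pos hrl] at ih
      rw [ih h0 (by omega)]
      constructor
      · rintro ⟨i, j, h1, h2, h3, h4, h5, h6⟩
        exact ⟨i, j, h1, h2, by omega, h4, h5, h6⟩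
      · rintro ⟨i, j, h1, h2, h3, h4, h5, h6⟩
        refine ⟨i, j, h1, h2, by omega, h4, h5, h6⟩
  | case2 l r hlr hor hc ih =>
    intro h0 hr
    rw [twoPtr, if_pos hlr, if_neg hor, if_pos hc]
    rw [ih (by omega) hr]
    constructor
    · rintro ⟨i, j, h1, h2, h3, h4, h5, h6⟩
      exact ⟨i, j, by omega, h2, h3, h4, h5, h6⟩
    · rintro ⟨i, j, h1, h2, h3, h4, h5, h6⟩
      rcases eq_or_lt_of_le h1 with rfl | h1'
      · exfalso
        have : pvGet s j ≤ pvGet s r := pvMono hs (by omega) (by omega) hr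
        omega
      · exact ⟨i, j, by omega, h2, h3, h4, h5, h6⟩
  | case3 l r hlr hor hc1 hc2 ih =>
    intro h0 hr
    rw [twoPtr, if_pos hlr, if_neg hor, if_neg hc1, if_pos hc2]
    rw [ih h0 (by omega)]
    constructor
    · rintro ⟨i, j, h1, h2, h3, h4, h5, h6⟩
      exact ⟨i, j, h1, h2, by omega, h4, h5, h6⟩
    · rintro ⟨i, j, h1, h2, h3, h4, h5, h6⟩
      rcases eq_or_lt_of_le h3 with rfl | h3'
      · exfalso
        have : pvGet s l ≤ pvGet s i := pvMono hs h0 (by omega) (by omega)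
        omega
      · exact ⟨i, j, h1, h2, by omega, h4, h5, h6⟩
  | case4 l r hlr hor hc1 hc2 =>
    intro h0 hr
    rw [twoPtr, if_pos hlr, if_neg hor, if_neg hc1, if_neg hc2]
    exact ⟨fun _ => ⟨l, r, le_refl l, hlr, le_refl r, fun h => hor (Or.inl h),
      fun h => hor (Or.inr h), by omega⟩, fun _ => rfl⟩
  | case5 l r hlr =>
    intro h0 hr
    rw [twoPtr, if_neg hlr]
    constructor
    · intro h; exact absurd h (by simp)
    · rintro ⟨i, j, h1, h2, h3, -, -, -⟩
      exact absurd (show l < r by omega) hlr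

theorem pvScan_iff (s : List Int) (suma ind : Int) (n : Int) (m : Nat) :
    ∀ (j : Int) (seen : PySem.Set Int), (n - j).toNat = m → 0 ≤ j →
    (∀ x : Int, x ∈ seen ↔ ∃ i : Int, 0 ≤ i ∧ i < j ∧ i ≠ ind ∧ pvGet s i = x) →
    (pvScan s suma ind (PySem.List.pyRange j n 1) seen = true ↔
      ∃ i k : Int, 0 ≤ i ∧ i < k ∧ j ≤ k ∧ k < n ∧ i ≠ ind ∧ k ≠ ind ∧
        pvGet s i + pvGet s k = suma) := by
  induction m with
  | zero =>
    intro j seen hm h0 hseen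
    rw [PySem.List.pyRange_one_eq_nil (by omega)]
    rw [pvScan]
    constructor
    · intro h; exact absurd h (by simp)
    · rintro ⟨i, k, -, -, h3, h4, -, -, -⟩
      exact absurd (show j < n by omega) (by omega)
  | succ m ih =>
    intro j seen hm h0 hseen
    have hjn : j < n := by omega
    rw [PySem.List.pyRange_one_cons hjn, pvScan]
    by_cases hj : j = ind
    · rw [if_pos hj]
      rw [ih (j + 1) seen (by omega) (by omega) (by
        intro x
        rw [hseen x]
        constructor
        · rintro ⟨i, a, b, c, d⟩; exact ⟨i, a, by omega, c, d⟩
        · rintro ⟨i, a, b, c, d⟩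
          refine ⟨i, a, ?_, c, d⟩
          rcases eq_or_lt_of_le (show i ≤ j by omega) with rfl | h
          · exact absurd hj (by omega)
          · omega)]
      constructor
      · rintro ⟨i, k, a, b, c, d, e, f, g⟩; exact ⟨i, k, a, b, by omega, d, e, f, g⟩
      · rintro ⟨i, k, a, b, c, d, e, f, g⟩
        refine ⟨i, k, a, b, ?_, d, e, f, g⟩
        rcases eq_or_lt_of_le c with rfl | h
        · exact absurd hj (by omega)
        · omega
    · rw [if_neg hj]
      by_cases hc : PySem.Set.contains seen (suma - PySem.List.pyGetD s j 0) = true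
      · rw [if_pos hc]
        rw [PySem.Set.contains_iff] at hc
        obtain ⟨i, a, b, c, d⟩ := (hseen _).1 hc
        simp only [true_iff]
        refine ⟨i, j, a, b, le_refl j, hjn, c, hj, ?_⟩
        have : pvGet s i = suma - pvGet s j := d
        omega
      · rw [if_neg hc]
        rw [ih (j + 1) (PySem.Set.add seen (PySem.List.pyGetD s j 0)) (by omega) (by omega) (by
          intro x
          rw [PySem.Set.mem_add, hseen x]
          constructor
          · rintro (⟨i, a, b, c, d⟩ | rfl)
            · exact ⟨i, a, by omega, c, d⟩
            · exact ⟨j, by omega, by omega, hj, rfl⟩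
          · rintro ⟨i, a, b, c, d⟩
            rcases eq_or_lt_of_le (show i ≤ j by omega) with rfl | h
            · exact Or.inr d.symm
            · exact Or.inl ⟨i, a, by omega, c, d⟩)]
        constructor
        · rintro ⟨i, k, a, b, c, d, e, f, g⟩; exact ⟨i, k, a, b, by omega, d, e, f, g⟩
        · rintro ⟨i, k, a, b, c, d, e, f, g⟩
          rcases eq_or_lt_of_le c with heq | h
          · exfalso
            apply hc
            rw [PySem.Set.contains_iff]
            refine (hseen _).2 ⟨i, a, by omega, e, ?_⟩
            have g' : pvGet s i + pvGet s k = suma := g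
            have hjk : pvGet s j = pvGet s k := by rw [heq]
            have e : pvGet s j = PySem.List.pyGetD s j 0 := rfl
            omega
          · exact ⟨i, k, a, b, by omega, d, e, f, g⟩

theorem every_sum_eq (tab : List Int) : every_sum tab = every_sum_alt tab := by
  rw [every_sum, every_sum_alt, quickSort_eq_sorted]
  set s := PySem.List.sorted tab (fun x => x) false with hsdef
  have hslen : s.length = tab.length := PySem.List.length_sorted tab (fun x => x) false
  have hpw : s.Pairwise (· ≤ ·) := PySem.List.sorted_pairwise tab (fun x => x)
  rw [hslen, Bool.eq_iff_iff, all_pyRange, all_pyRange]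
  refine forall_congr' fun ind => imp_congr_right fun h0ind => imp_congr_right fun hindn => ?_
  rw [twoPtr_iff s ind (pvGet s ind) hpw 0 ((tab.length : Int) - 1) (by omega)
    (by rw [hslen]; omega)]
  rw [pvScan_iff s (PySem.List.pyGetD s ind 0) ind ((tab.length : Int))
    ((tab.length : Int)).toNat 0 PySem.Set.empty (by omega) (by omega) (by
      intro x
      constructor
      · intro h; exact absurd h (by simp [PySem.Set.empty])
      · rintro ⟨i, a, b, -, -⟩; exact absurd b (by omega))]
  constructor
  · rintro ⟨i, j, h1, h2, h3, h4, h5, h6⟩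
    exact ⟨i, j, h1, h2, by omega, by omega, h4, h5, h6⟩
  · rintro ⟨i, k, h1, h2, h3, h4, h5, h6, h7⟩
    exact ⟨i, k, h1, h2, by omega, h5, h6, h7⟩

-- ===== VERDICT (by name: the statement is the Claim_ definition above) =====
theorem every_sum_spec : Claim_equal_every_sum := by
  intro tab _
  exact every_sum_eq tab
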